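-- pv_equiv track=rewrite | github.com/cvr-bhupalreddy/dsa-python-2025 | DSA/DP/DP_LCS/25.Count_LCS.py | lcs_count_tabulation
-- ===== SOURCE A (Python) =====
-- def lcs_count_tabulation(s1, s2):
--     n, m = len(s1), len(s2)
--
--     dp = [[0] * (m + 1) for _ in range(n + 1)]
--     cnt = [[0] * (m + 1) for _ in range(n + 1)]
--
--     for i in range(n + 1):
--         for j in range(m + 1):
--             if i == 0 or j == 0:
--                 cnt[i][j] = 1
--
--     for i in range(1, n + 1):
--         for j in range(1, m + 1):
--             if s1[i - 1] == s2[j - 1]: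
--                 dp[i][j] = 1 + dp[i - 1][j - 1]
--                 cnt[i][j] = cnt[i - 1][j - 1]
--             else:
--                 if dp[i - 1][j] > dp[i][j - 1]:
--                     dp[i][j] = dp[i - 1][j]
--                     cnt[i][j] = cnt[i - 1][j]
--                 elif dp[i][j - 1] > dp[i - 1][j]:
--                     dp[i][j] = dp[i][j - 1]
--                     cnt[i][j] = cnt[i][j - 1]
--                 else:
--                     dp[i][j] = dp[i - 1][j]
--                     cnt[i][j] = cnt[i - 1][j] + cnt[i][j - 1]
--
--                     if dp[i - 1][j - 1] == dp[i][j]: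
--                         cnt[i][j] -= cnt[i - 1][j - 1]
--
--     return dp[n][m], cnt[n][m]
-- ===== SOURCE B (Python) =====
-- def lcs_count_tabulation(s1, s2):
--     # Top-down memoized recursion on (i, j) instead of bottom-up tables:
--     # only the cells the recurrence actually reaches are ever computed.
--     memo = {}
--
--     def f(i, j):
--         key = (i, j)
--         if key in memo:
--             return memo[key]
--         if i == 0 or j == 0:
--             r = (0, 1)
--         elif s1[i - 1] == s2[j - 1]:
--             l, c = f(i - 1, j - 1)
--             r = (l + 1, c)
--         else:
--             up = f(i - 1, j)
--             left = f(i, j - 1)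
--             if up[0] > left[0]:
--                 r = up
--             elif left[0] > up[0]:
--                 r = left
--             else:
--                 dl, dc = f(i - 1, j - 1)
--                 r = (up[0], up[1] + left[1] - (dc if dl == up[0] else 0))
--         memo[key] = r
--         return r
--
--     return f(len(s1), len(s2))
-- ===== Notes on version B (the rewrite author's own statement) =====
-- stated objective: alternative
-- what changed: Replaces A's bottom-up tabulation over two full (n+1)x(m+1) tables (with a separate initialisation pass and index arithmetic) by a top-down memoized recursion f(i,j) returning a (length,count) pair, which computes only the cells the recurrence actually reaches.
import Mathlib
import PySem

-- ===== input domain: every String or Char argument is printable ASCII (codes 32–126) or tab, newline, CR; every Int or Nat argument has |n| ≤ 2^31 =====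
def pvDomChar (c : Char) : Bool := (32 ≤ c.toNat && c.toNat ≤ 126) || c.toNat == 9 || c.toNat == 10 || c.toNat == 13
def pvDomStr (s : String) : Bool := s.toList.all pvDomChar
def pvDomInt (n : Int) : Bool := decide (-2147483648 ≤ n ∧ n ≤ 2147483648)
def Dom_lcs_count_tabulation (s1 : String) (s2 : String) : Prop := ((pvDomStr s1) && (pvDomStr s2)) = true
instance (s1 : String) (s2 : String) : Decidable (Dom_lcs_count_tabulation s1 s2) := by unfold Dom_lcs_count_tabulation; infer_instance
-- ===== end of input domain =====

-- B replaces A's bottom-up tabulation over two full 2D tables by a top-down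
-- memoized recursion returning (length, count) pairs — a different decomposition
-- of the same recurrence ("alternative", not claimed faster).

-- ===== PORT A =====
-- 2D access/update helpers: t[i][j] read with default 0, and t[i][j] = v.
def pvGet2 (t : List (List Int)) (i j : Nat) : Int := (t.getD i []).getD j 0
def pvSet2 (t : List (List Int)) (i j : Nat) (v : Int) : List (List Int) :=
  t.set i ((t.getD i []).set j v)

-- Body of A's main double loop at cell (i, j) (1-based, both in range).
def pvCellA (a b : List Char) (i j : Nat)
    (st : List (List Int) × List (List Int)) : List (List Int) × List (List Int) :=
  let dp := st.1
  let cnt := st.2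
  if a.getD (i-1) ' ' = b.getD (j-1) ' ' then
    (pvSet2 dp i j (1 + pvGet2 dp (i-1) (j-1)), pvSet2 cnt i j (pvGet2 cnt (i-1) (j-1)))
  else if pvGet2 dp (i-1) j > pvGet2 dp i (j-1) then
    (pvSet2 dp i j (pvGet2 dp (i-1) j), pvSet2 cnt i j (pvGet2 cnt (i-1) j))
  else if pvGet2 dp i (j-1) > pvGet2 dp (i-1) j then
    (pvSet2 dp i j (pvGet2 dp i (j-1)), pvSet2 cnt i j (pvGet2 cnt i (j-1)))
  else
    let dp' := pvSet2 dp i j (pvGet2 dp (i-1) j)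
    let cnt' := pvSet2 cnt i j (pvGet2 cnt (i-1) j + pvGet2 cnt i (j-1))
    let cnt'' := if pvGet2 dp' (i-1) (j-1) = pvGet2 dp' i j then
        pvSet2 cnt' i j (pvGet2 cnt' i j - pvGet2 cnt' (i-1) (j-1))
      else cnt'
    (dp', cnt'')

-- Literal port of A.  range(1, n+1) is written as List.range n with the index
-- shifted by 1 (same iteration sequence); string indexing is in range at every
-- read, written with getD (exact there).
def lcs_count_tabulation (s1 : String) (s2 : String) : Int × Int :=
  let a := s1.toList
  let b := s2.toList
  let n := a.length
  let m := b.length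
  let dp := (List.range (n+1)).map (fun _ => List.replicate (m+1) (0:Int))
  let cnt0 := (List.range (n+1)).map (fun _ => List.replicate (m+1) (0:Int))
  let cnt := (List.range (n+1)).foldl (fun c i =>
      (List.range (m+1)).foldl (fun c j =>
        if i = 0 ∨ j = 0 then pvSet2 c i j 1 else c) c) cnt0
  let fin := (List.range n).foldl (fun st i0 =>
      (List.range m).foldl (fun st j0 => pvCellA a b (i0+1) (j0+1) st) st) (dp, cnt)
  (pvGet2 fin.1 n m, pvGet2 fin.2 n m)

-- ===== PORT B =====
-- Source B's memo dict, threaded explicitly through the recursion (Python mutates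
-- one dict in place; the port passes it in and returns the updated one).
-- Termination: every recursive call decreases i + j.
def pvF (a b : List Char) : (i j : Nat) → PySem.Dict (Nat × Nat) (Int × Int) →
    PySem.Dict (Nat × Nat) (Int × Int) × (Int × Int)
  | i, j, memo =>
    match memo.get? (i, j) with
    | some v => (memo, v)
    | none =>
      let p : PySem.Dict (Nat × Nat) (Int × Int) × (Int × Int) :=
        match i, j with
        | 0, _ => (memo, ((0:Int), (1:Int)))
        | _+1, 0 => (memo, ((0:Int), (1:Int)))
        | i'+1, j'+1 =>
          if a.getD i' ' ' = b.getD j' ' ' then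
            let r := pvF a b i' j' memo
            (r.1, (r.2.1 + 1, r.2.2))
          else
            let ru := pvF a b i' (j'+1) memo
            let rl := pvF a b (i'+1) j' ru.1
            if ru.2.1 > rl.2.1 then (rl.1, ru.2)
            else if rl.2.1 > ru.2.1 then (rl.1, rl.2)
            else
              let rd := pvF a b i' j' rl.1
              (rd.1, (ru.2.1, ru.2.2 + rl.2.2 - (if rd.2.1 = ru.2.1 then rd.2.2 else 0)))
      (p.1.insert (i, j) p.2, p.2)
termination_by i j => i + j

-- Port of B: f(len(s1), len(s2)) starting from an empty memo.
def lcs_count_tabulation_alt (s1 : String) (s2 : String) : Int × Int :=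
  (pvF s1.toList s2.toList s1.toList.length s2.toList.length PySem.Dict.empty).2

-- ===== PRECONDITION & SPEC =====
def Spec_lcs_count_tabulation (s1 : String) (s2 : String) (out : Int × Int) : Prop := out = lcs_count_tabulation_alt s1 s2
instance (s1 : String) (s2 : String) (out : Int × Int) : Decidable (Spec_lcs_count_tabulation s1 s2 out) := by unfold Spec_lcs_count_tabulation; infer_instance

-- ===== CLAIM (what is proved, stated in full; the proofs are below) =====
def Claim_equal_lcs_count_tabulation : Prop := ∀ (s1 : String) (s2 : String), Dom_lcs_count_tabulation s1 s2 → Spec_lcs_count_tabulation s1 s2 (lcs_count_tabulation s1 s2)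

-- ===== LEMMAS AND PROOFS =====

-- The (length, count) recurrence both programs compute.
def lcsG (a b : List Char) : Nat → Nat → Int × Int
  | 0, _ => (0, 1)
  | _+1, 0 => (0, 1)
  | i+1, j+1 =>
    if a.getD i ' ' = b.getD j ' ' then
      ((lcsG a b i j).1 + 1, (lcsG a b i j).2)
    else if (lcsG a b i (j+1)).1 > (lcsG a b (i+1) j).1 then lcsG a b i (j+1)
    else if (lcsG a b (i+1) j).1 > (lcsG a b i (j+1)).1 then lcsG a b (i+1) j
    else ((lcsG a b i (j+1)).1,
      (lcsG a b i (j+1)).2 + (lcsG a b (i+1) j).2 -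
        (if (lcsG a b i j).1 = (lcsG a b i (j+1)).1 then (lcsG a b i j).2 else 0))
termination_by i j => i + j

lemma lcsG_zero_left (a b : List Char) (j : Nat) : lcsG a b 0 j = (0, 1) := by
  cases j <;> simp [lcsG]

-- pvGet2 / pvSet2 basic lemmas -------------------------------------------------

lemma pvSet2_length (t : List (List Int)) (i j : Nat) (v : Int) :
    (pvSet2 t i j v).length = t.length := by simp [pvSet2]

lemma pvGet2_set2_eq (t : List (List Int)) (i j : Nat) (v : Int)
    (hi : i < t.length) (hj : j < (t.getD i []).length) :
    pvGet2 (pvSet2 t i j v) i j = v := by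
  unfold pvGet2 pvSet2
  simp only [List.getD_eq_getElem?_getD, List.getElem?_set_self hi, Option.getD_some]
  rw [List.getElem?_set_self, Option.getD_some]
  simpa [List.getD_eq_getElem?_getD] using hj

lemma pvGet2_set2_ne (t : List (List Int)) (i j : Nat) (v : Int) (i' j' : Nat)
    (h : ¬(i' = i ∧ j' = j)) :
    pvGet2 (pvSet2 t i j v) i' j' = pvGet2 t i' j' := by
  unfold pvGet2 pvSet2
  by_cases hii : i' = i
  · subst hii
    have hjj : j' ≠ j := fun hj => h ⟨rfl, hj⟩
    by_cases hlt : i' < t.length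
    · simp only [List.getD_eq_getElem?_getD, List.getElem?_set_self hlt, Option.getD_some]
      rw [List.getElem?_set_ne (Ne.symm hjj)]
    · rw [List.set_eq_of_length_le (by omega)]
  · simp only [List.getD_eq_getElem?_getD, List.getElem?_set_ne (Ne.symm hii)]

lemma pvSet2_row_length (t : List (List Int)) (i j : Nat) (v : Int) (k : Nat) :
    ((pvSet2 t i j v).getD k []).length = (t.getD k []).length := by
  unfold pvSet2
  by_cases hik : k = i
  · subst hik
    by_cases hlt : k < t.length
    · simp only [List.getD_eq_getElem?_getD, List.getElem?_set_self hlt, Option.getD_some,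
        List.length_set]
    · rw [List.set_eq_of_length_le (by omega)]
  · simp only [List.getD_eq_getElem?_getD, List.getElem?_set_ne (Ne.symm hik)]

-- Shape: an (n+1) × (m+1) table.
def pvSh (t : List (List Int)) (n m : Nat) : Prop :=
  t.length = n + 1 ∧ ∀ i, i ≤ n → (t.getD i []).length = m + 1

lemma pvSh_set2 (t : List (List Int)) (n m i j : Nat) (v : Int) (h : pvSh t n m) :
    pvSh (pvSet2 t i j v) n m := by
  refine ⟨by simp [pvSet2_length, h.1], fun k hk => ?_⟩
  rw [pvSet2_row_length]; exact h.2 k hk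

-- A-side invariants -------------------------------------------------------------

-- Cells already processed after A has handled rows 1..i-1 fully and row i through column j.
def pvDone (i j i' j' : Nat) : Bool := decide (i' = 0 ∨ j' = 0 ∨ i' < i ∨ (i' = i ∧ j' ≤ j))


def pvInv (a b : List Char) (i j : Nat) (st : List (List Int) × List (List Int)) : Prop :=
  pvSh st.1 a.length b.length ∧ pvSh st.2 a.length b.length ∧
  ∀ i' j', i' ≤ a.length → j' ≤ b.length →
    pvGet2 st.1 i' j' = (if pvDone i j i' j' then (lcsG a b i' j').1 else 0) ∧
    pvGet2 st.2 i' j' = (if pvDone i j i' j' then (lcsG a b i' j').2 else 0)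

lemma pvInv_advance (a b : List Char) (i j : Nat) (st : List (List Int) × List (List Int))
    (t1 t2 : List (List Int)) (h : pvInv a b (i+1) j st)
    (hsh1 : pvSh t1 a.length b.length) (hsh2 : pvSh t2 a.length b.length)
    (hcell1 : pvGet2 t1 (i+1) (j+1) = (lcsG a b (i+1) (j+1)).1)
    (hcell2 : pvGet2 t2 (i+1) (j+1) = (lcsG a b (i+1) (j+1)).2)
    (hother1 : ∀ i' j', ¬(i' = i+1 ∧ j' = j+1) → pvGet2 t1 i' j' = pvGet2 st.1 i' j')
    (hother2 : ∀ i' j', ¬(i' = i+1 ∧ j' = j+1) → pvGet2 t2 i' j' = pvGet2 st.2 i' j') :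
    pvInv a b (i+1) (j+1) (t1, t2) := by
  refine ⟨hsh1, hsh2, fun i' j' hi' hj' => ?_⟩
  by_cases hcell : i' = i+1 ∧ j' = j+1
  · obtain ⟨rfl, rfl⟩ := hcell
    have hdone : pvDone (i+1) (j+1) (i+1) (j+1) = true := by unfold pvDone; rw [decide_eq_true_eq]; omega
    rw [hcell1, hcell2]
    simp only [if_pos hdone]
    trivial
  · have hd : pvDone (i+1) (j+1) i' j' = pvDone (i+1) j i' j' := by rw [Bool.eq_iff_iff]; simp only [pvDone, decide_eq_true_eq]; omega
    have hv' := h.2.2 i' j' hi' hj'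
    rw [hother1 i' j' hcell, hother2 i' j' hcell, hv'.1, hv'.2]
    simp only [hd]
    trivial

lemma pvCellA_step (a b : List Char) (i j : Nat) (st : List (List Int) × List (List Int))
    (hi : i < a.length) (hj : j + 1 ≤ b.length) (h : pvInv a b (i+1) j st) :
    pvInv a b (i+1) (j+1) (pvCellA a b (i+1) (j+1) st) := by
  obtain ⟨hsh1, hsh2, hv⟩ := h
  have hii : i ≤ a.length := by omega
  have hjj : j ≤ b.length := by omega
  have hjj1 : j + 1 ≤ b.length := hj
  have hdd : pvDone (i+1) j i j = true := by unfold pvDone; rw [decide_eq_true_eq]; omega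
  have hdu : pvDone (i+1) j i (j+1) = true := by unfold pvDone; rw [decide_eq_true_eq]; omega
  have hdl : pvDone (i+1) j (i+1) j = true := by unfold pvDone; rw [decide_eq_true_eq]; omega
  have hdiag1 : pvGet2 st.1 i j = (lcsG a b i j).1 := by
    rw [(hv i j hii hjj).1, if_pos hdd]
  have hdiag2 : pvGet2 st.2 i j = (lcsG a b i j).2 := by
    rw [(hv i j hii hjj).2, if_pos hdd]
  have hup1 : pvGet2 st.1 i (j+1) = (lcsG a b i (j+1)).1 := by
    rw [(hv i (j+1) hii hjj1).1, if_pos hdu]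
  have hup2 : pvGet2 st.2 i (j+1) = (lcsG a b i (j+1)).2 := by
    rw [(hv i (j+1) hii hjj1).2, if_pos hdu]
  have hleft1 : pvGet2 st.1 (i+1) j = (lcsG a b (i+1) j).1 := by
    rw [(hv (i+1) j (by omega) hjj).1, if_pos hdl]
  have hleft2 : pvGet2 st.2 (i+1) j = (lcsG a b (i+1) j).2 := by
    rw [(hv (i+1) j (by omega) hjj).2, if_pos hdl]
  have hlen1 : i + 1 < st.1.length := by rw [hsh1.1]; omega
  have hlen2 : i + 1 < st.2.length := by rw [hsh2.1]; omega
  have hrow1 : j + 1 < (st.1.getD (i+1) []).length := by rw [hsh1.2 (i+1) (by omega)]; omega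
  have hrow2 : j + 1 < (st.2.getD (i+1) []).length := by rw [hsh2.2 (i+1) (by omega)]; omega
  have hG : lcsG a b (i+1) (j+1) =
      if a.getD i ' ' = b.getD j ' ' then
        ((lcsG a b i j).1 + 1, (lcsG a b i j).2)
      else if (lcsG a b i (j+1)).1 > (lcsG a b (i+1) j).1 then lcsG a b i (j+1)
      else if (lcsG a b (i+1) j).1 > (lcsG a b i (j+1)).1 then lcsG a b (i+1) j
      else ((lcsG a b i (j+1)).1,
        (lcsG a b i (j+1)).2 + (lcsG a b (i+1) j).2 -
          (if (lcsG a b i j).1 = (lcsG a b i (j+1)).1 then (lcsG a b i j).2 else 0)) := by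
    rw [lcsG]
  simp only [pvCellA, Nat.add_sub_cancel, hdiag1, hdiag2, hup1, hup2, hleft1, hleft2]
  by_cases hc : a.getD i ' ' = b.getD j ' '
  · rw [if_pos hc]
    refine pvInv_advance a b i j st _ _ ⟨hsh1, hsh2, hv⟩
      (pvSh_set2 _ _ _ _ _ _ hsh1) (pvSh_set2 _ _ _ _ _ _ hsh2) ?_ ?_
      (fun i' j' hne => pvGet2_set2_ne _ _ _ _ _ _ hne)
      (fun i' j' hne => pvGet2_set2_ne _ _ _ _ _ _ hne)
    · rw [pvGet2_set2_eq _ _ _ _ hlen1 hrow1, hG, if_pos hc]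
      dsimp only
      omega
    · rw [pvGet2_set2_eq _ _ _ _ hlen2 hrow2, hG, if_pos hc]
  · rw [if_neg hc]
    by_cases hgt1 : (lcsG a b i (j+1)).1 > (lcsG a b (i+1) j).1
    · rw [if_pos hgt1]
      refine pvInv_advance a b i j st _ _ ⟨hsh1, hsh2, hv⟩
        (pvSh_set2 _ _ _ _ _ _ hsh1) (pvSh_set2 _ _ _ _ _ _ hsh2) ?_ ?_
        (fun i' j' hne => pvGet2_set2_ne _ _ _ _ _ _ hne)
        (fun i' j' hne => pvGet2_set2_ne _ _ _ _ _ _ hne)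
      · rw [pvGet2_set2_eq _ _ _ _ hlen1 hrow1, hG, if_neg hc, if_pos hgt1]
      · rw [pvGet2_set2_eq _ _ _ _ hlen2 hrow2, hG, if_neg hc, if_pos hgt1]
    · rw [if_neg hgt1]
      by_cases hgt2 : (lcsG a b (i+1) j).1 > (lcsG a b i (j+1)).1
      · rw [if_pos hgt2]
        refine pvInv_advance a b i j st _ _ ⟨hsh1, hsh2, hv⟩
          (pvSh_set2 _ _ _ _ _ _ hsh1) (pvSh_set2 _ _ _ _ _ _ hsh2) ?_ ?_
          (fun i' j' hne => pvGet2_set2_ne _ _ _ _ _ _ hne)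
          (fun i' j' hne => pvGet2_set2_ne _ _ _ _ _ _ hne)
        · rw [pvGet2_set2_eq _ _ _ _ hlen1 hrow1, hG, if_neg hc, if_neg hgt1, if_pos hgt2]
        · rw [pvGet2_set2_eq _ _ _ _ hlen2 hrow2, hG, if_neg hc, if_neg hgt1, if_pos hgt2]
      · rw [if_neg hgt2]
        have hGtie : lcsG a b (i+1) (j+1) = ((lcsG a b i (j+1)).1,
            (lcsG a b i (j+1)).2 + (lcsG a b (i+1) j).2 -
              (if (lcsG a b i j).1 = (lcsG a b i (j+1)).1 then (lcsG a b i j).2 else 0)) := by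
          rw [hG, if_neg hc, if_neg hgt1, if_neg hgt2]
        have hdp'diag : pvGet2 (pvSet2 st.1 (i+1) (j+1) (lcsG a b i (j+1)).1) i j
            = (lcsG a b i j).1 := by
          rw [pvGet2_set2_ne _ _ _ _ _ _ (by omega), hdiag1]
        have hdp'cell : pvGet2 (pvSet2 st.1 (i+1) (j+1) (lcsG a b i (j+1)).1) (i+1) (j+1)
            = (lcsG a b i (j+1)).1 := pvGet2_set2_eq _ _ _ _ hlen1 hrow1
        have hcnt'cell : pvGet2 (pvSet2 st.2 (i+1) (j+1)
            ((lcsG a b i (j+1)).2 + (lcsG a b (i+1) j).2)) (i+1) (j+1)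
            = (lcsG a b i (j+1)).2 + (lcsG a b (i+1) j).2 := pvGet2_set2_eq _ _ _ _ hlen2 hrow2
        have hcnt'diag : pvGet2 (pvSet2 st.2 (i+1) (j+1)
            ((lcsG a b i (j+1)).2 + (lcsG a b (i+1) j).2)) i j
            = (lcsG a b i j).2 := by
          rw [pvGet2_set2_ne _ _ _ _ _ _ (by omega), hdiag2]
        simp only [hdp'diag, hdp'cell, hcnt'cell, hcnt'diag]
        by_cases hsub : (lcsG a b i j).1 = (lcsG a b i (j+1)).1
        · rw [if_pos hsub]
          refine pvInv_advance a b i j st _ _ ⟨hsh1, hsh2, hv⟩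
            (pvSh_set2 _ _ _ _ _ _ hsh1)
            (pvSh_set2 _ _ _ _ _ _ (pvSh_set2 _ _ _ _ _ _ hsh2)) ?_ ?_
            (fun i' j' hne => pvGet2_set2_ne _ _ _ _ _ _ hne)
            (fun i' j' hne => by
              rw [pvGet2_set2_ne _ _ _ _ _ _ hne, pvGet2_set2_ne _ _ _ _ _ _ hne])
          · rw [hdp'cell, hGtie]
          · have hlen2' : i + 1 < (pvSet2 st.2 (i+1) (j+1)
                ((lcsG a b i (j+1)).2 + (lcsG a b (i+1) j).2)).length := by
              rw [pvSet2_length]; exact hlen2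
            have hrow2' : j + 1 < ((pvSet2 st.2 (i+1) (j+1)
                ((lcsG a b i (j+1)).2 + (lcsG a b (i+1) j).2)).getD (i+1) []).length := by
              rw [pvSet2_row_length]; exact hrow2
            rw [pvGet2_set2_eq _ _ _ _ hlen2' hrow2', hGtie]
            dsimp only
            rw [if_pos hsub]
        · rw [if_neg hsub]
          refine pvInv_advance a b i j st _ _ ⟨hsh1, hsh2, hv⟩
            (pvSh_set2 _ _ _ _ _ _ hsh1) (pvSh_set2 _ _ _ _ _ _ hsh2) ?_ ?_
            (fun i' j' hne => pvGet2_set2_ne _ _ _ _ _ _ hne)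
            (fun i' j' hne => pvGet2_set2_ne _ _ _ _ _ _ hne)
          · rw [hdp'cell, hGtie]
          · rw [hcnt'cell, hGtie]
            dsimp only
            rw [if_neg hsub]
            omega

lemma pvInnerA (a b : List Char) (i : Nat) (st : List (List Int) × List (List Int))
    (hi : i < a.length) (h : pvInv a b (i+1) 0 st) :
    ∀ k, k ≤ b.length →
      pvInv a b (i+1) k ((List.range k).foldl (fun st j0 => pvCellA a b (i+1) (j0+1) st) st) := by
  intro k
  induction k with
  | zero => intro _; simpa using h
  | succ k ih =>
    intro hk
    rw [List.range_succ, List.foldl_append]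
    exact pvCellA_step a b i k _ hi hk (ih (by omega))

lemma pvInv_shift (a b : List Char) (i : Nat) (st : List (List Int) × List (List Int))
    (h : pvInv a b i b.length st) : pvInv a b (i+1) 0 st := by
  refine ⟨h.1, h.2.1, fun i' j' hi' hj' => ?_⟩
  have := h.2.2 i' j' hi' hj'
  have hd : pvDone i b.length i' j' = pvDone (i+1) 0 i' j' := by rw [Bool.eq_iff_iff]; simp only [pvDone, decide_eq_true_eq]; omega
  simp only [← hd]; exact this

lemma pvOuterA (a b : List Char) (st : List (List Int) × List (List Int))
    (h : pvInv a b 0 b.length st) :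
    ∀ k, k ≤ a.length →
      pvInv a b k b.length ((List.range k).foldl (fun st i0 =>
        (List.range b.length).foldl (fun st j0 => pvCellA a b (i0+1) (j0+1) st) st) st) := by
  intro k
  induction k with
  | zero => intro _; simpa using h
  | succ k ih =>
    intro hk
    rw [List.range_succ, List.foldl_append]
    exact pvInnerA a b k _ (by omega) (pvInv_shift a b k _ (ih (by omega))) b.length le_rfl


lemma lcsG_base (a b : List Char) (i j : Nat) (h : i = 0 ∨ j = 0) : lcsG a b i j = (0, 1) := by
  rcases h with rfl | rfl
  · exact lcsG_zero_left a b j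
  · cases i <;> simp [lcsG]

-- A: the initialisation loops (row 0 / column 0 of cnt set to 1)
def pvDoneI (i j i' j' : Nat) : Bool := decide ((i' = 0 ∨ j' = 0) ∧ (i' < i ∨ (i' = i ∧ j' < j)))
def pvInvI (n m i j : Nat) (c : List (List Int)) : Prop :=
  pvSh c n m ∧ ∀ i' j', i' ≤ n → j' ≤ m →
    pvGet2 c i' j' = if pvDoneI i j i' j' then 1 else 0

lemma pvInitA_step (n m i j : Nat) (c : List (List Int)) (hi : i ≤ n) (hj : j ≤ m)
    (h : pvInvI n m i j c) :
    pvInvI n m i (j+1) (if i = 0 ∨ j = 0 then pvSet2 c i j 1 else c) := by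
  by_cases hc : i = 0 ∨ j = 0
  · rw [if_pos hc]
    refine ⟨pvSh_set2 _ _ _ _ _ _ h.1, fun i' j' hi' hj' => ?_⟩
    by_cases hcell : i' = i ∧ j' = j
    · obtain ⟨rfl, rfl⟩ := hcell
      rw [pvGet2_set2_eq _ _ _ _ (by rw [h.1.1]; omega) (by rw [h.1.2 i' hi']; omega),
        if_pos (show pvDoneI i' (j'+1) i' j' = true by unfold pvDoneI; rw [decide_eq_true_eq]; exact ⟨hc, by omega⟩)]
    · rw [pvGet2_set2_ne _ _ _ _ _ _ hcell, h.2 i' j' hi' hj']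
      have hd : pvDoneI i j i' j' = pvDoneI i (j+1) i' j' := by rw [Bool.eq_iff_iff]; simp only [pvDoneI, decide_eq_true_eq]; omega
      simp only [← hd]
  · rw [if_neg hc]
    refine ⟨h.1, fun i' j' hi' hj' => ?_⟩
    rw [h.2 i' j' hi' hj']
    have hd : pvDoneI i j i' j' = pvDoneI i (j+1) i' j' := by rw [Bool.eq_iff_iff]; simp only [pvDoneI, decide_eq_true_eq]; omega
    simp only [← hd]

lemma pvInitA_inner (n m i : Nat) (c : List (List Int)) (hi : i ≤ n) (h : pvInvI n m i 0 c) :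
    ∀ k, k ≤ m + 1 →
      pvInvI n m i k ((List.range k).foldl (fun c j =>
        if i = 0 ∨ j = 0 then pvSet2 c i j 1 else c) c) := by
  intro k
  induction k with
  | zero => intro _; simpa using h
  | succ k ih =>
    intro hk
    rw [List.range_succ, List.foldl_append]
    exact pvInitA_step n m i k _ hi (by omega) (ih (by omega))

lemma pvInvI_shift (n m i : Nat) (c : List (List Int)) (h : pvInvI n m i (m+1) c) :
    pvInvI n m (i+1) 0 c := by
  refine ⟨h.1, fun i' j' hi' hj' => ?_⟩
  rw [h.2 i' j' hi' hj']
  have hd : pvDoneI i (m+1) i' j' = pvDoneI (i+1) 0 i' j' := by rw [Bool.eq_iff_iff]; simp only [pvDoneI, decide_eq_true_eq]; omega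
  simp only [hd]

lemma pvInitA_outer (n m : Nat) (c : List (List Int)) (h : pvInvI n m 0 0 c) :
    ∀ k, k ≤ n + 1 →
      pvInvI n m k 0 ((List.range k).foldl (fun c i =>
        (List.range (m+1)).foldl (fun c j =>
          if i = 0 ∨ j = 0 then pvSet2 c i j 1 else c) c) c) := by
  intro k
  induction k with
  | zero => intro _; simpa using h
  | succ k ih =>
    intro hk
    rw [show List.range (k+1) = List.range k ++ [k] from List.range_succ, List.foldl_append]
    exact pvInvI_shift n m k _ (pvInitA_inner n m k _ (by omega) (ih (by omega)) (m+1) le_rfl)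

lemma pvInit0 (n m : Nat) :
    pvInvI n m 0 0 ((List.range (n+1)).map (fun _ => List.replicate (m+1) (0:Int))) := by
  have hrow : ∀ i', i' ≤ n →
      ((List.range (n+1)).map (fun _ => List.replicate (m+1) (0:Int))).getD i' []
        = List.replicate (m+1) (0:Int) := by
    intro i' hi'
    rw [List.getD_eq_getElem?_getD, List.getElem?_map]
    simp [List.getElem?_range (show i' < n+1 by omega)]
  refine ⟨⟨by simp, fun i' hi' => by rw [hrow i' hi']; simp⟩, fun i' j' hi' hj' => ?_⟩
  unfold pvGet2
  rw [hrow i' hi']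
  have hnd : ¬ pvDoneI 0 0 i' j' = true := by simp only [pvDoneI, decide_eq_true_eq]; omega
  simp [hnd]

lemma pvInitA (a b : List Char) :
    pvInv a b 0 b.length
      ((List.range (a.length+1)).map (fun _ => List.replicate (b.length+1) (0:Int)),
       (List.range (a.length+1)).foldl (fun c i =>
          (List.range (b.length+1)).foldl (fun c j =>
            if i = 0 ∨ j = 0 then pvSet2 c i j 1 else c) c)
        ((List.range (a.length+1)).map (fun _ => List.replicate (b.length+1) (0:Int)))) := by
  have hdp := pvInit0 a.length b.length
  have hcnt := pvInitA_outer a.length b.length _ (pvInit0 a.length b.length) (a.length+1) le_rfl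
  refine ⟨hdp.1, hcnt.1, fun i' j' hi' hj' => ?_⟩
  have h1 := hdp.2 i' j' hi' hj'
  have h2 := hcnt.2 i' j' hi' hj'
  have hnd : ¬ pvDoneI 0 0 i' j' = true := by simp only [pvDoneI, decide_eq_true_eq]; omega
  rw [if_neg hnd] at h1
  constructor
  · rw [h1]
    by_cases hd : pvDone 0 b.length i' j' = true
    · have hb : i' = 0 ∨ j' = 0 := by simp only [pvDone, decide_eq_true_eq] at hd; omega
      rw [if_pos hd, lcsG_base a b i' j' hb]
    · rw [if_neg hd]
  · rw [h2]
    by_cases hd : pvDone 0 b.length i' j' = true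
    · have hb : i' = 0 ∨ j' = 0 := by simp only [pvDone, decide_eq_true_eq] at hd; omega
      rw [if_pos (show pvDoneI (a.length+1) 0 i' j' = true from by simp only [pvDoneI, decide_eq_true_eq] at hd ⊢; omega),
        if_pos hd, lcsG_base a b i' j' hb]
    · have hb : ¬ (i' = 0 ∨ j' = 0) := by simp only [pvDone, decide_eq_true_eq] at hd; omega
      rw [if_neg (show ¬ pvDoneI (a.length+1) 0 i' j' = true from by simp only [pvDoneI, decide_eq_true_eq] at hd ⊢; omega), if_neg hd]

-- B-side lemmas -----------------------------------------------------------------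

-- A memo is good when every entry holds the recurrence's value for its key.
def pvGood (a b : List Char) (memo : PySem.Dict (Nat × Nat) (Int × Int)) : Prop :=
  ∀ i j v, memo.get? (i, j) = some v → v = lcsG a b i j

lemma pvGood_empty (a b : List Char) : pvGood a b PySem.Dict.empty := by
  intro i j v h
  rw [PySem.Dict.get?_empty] at h
  exact absurd h (by simp)

lemma pvGood_insert (a b : List Char) (memo : PySem.Dict (Nat × Nat) (Int × Int))
    (i j : Nat) (v : Int × Int) (h : pvGood a b memo) (hv : v = lcsG a b i j) :
    pvGood a b (memo.insert (i, j) v) := by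
  intro i' j' w hw
  rw [PySem.Dict.get?_insert] at hw
  by_cases he : ((i', j') : Nat × Nat) = (i, j)
  · rw [if_pos he] at hw
    obtain ⟨h1, h2⟩ := Prod.mk.injEq .. ▸ he
    cases hw
    simp only [Prod.mk.injEq] at he
    rw [hv, he.1, he.2]
  · rw [if_neg he] at hw
    exact h i' j' w hw

-- The memoized recursion computes the recurrence and keeps the memo good.
lemma pvF_spec (a b : List Char) :
    ∀ (n i j : Nat), i + j ≤ n → ∀ memo, pvGood a b memo →
      pvGood a b (pvF a b i j memo).1 ∧ (pvF a b i j memo).2 = lcsG a b i j := by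
  intro n
  induction n with
  | zero =>
    intro i j hij memo hg
    have hi0 : i = 0 := by omega
    have hj0 : j = 0 := by omega
    subst hi0; subst hj0
    rw [pvF.eq_def]
    cases hmem : memo.get? ((0, 0) : Nat × Nat) with
    | some v =>
      simp only [hmem]
      exact ⟨hg, hg 0 0 v hmem⟩
    | none =>
      simp only [hmem]
      refine ⟨pvGood_insert a b memo 0 0 _ hg ?_, ?_⟩
      · rw [lcsG_zero_left]
      · rw [lcsG_zero_left]
  | succ n ih =>
    intro i j hij memo hg
    rw [pvF.eq_def]
    cases hmem : memo.get? ((i, j) : Nat × Nat) with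
    | some v =>
      simp only [hmem]
      exact ⟨hg, hg i j v hmem⟩
    | none =>
      simp only [hmem]
      match i, j with
      | 0, j =>
        exact ⟨pvGood_insert a b memo 0 j _ hg (by rw [lcsG_zero_left]),
          by rw [lcsG_zero_left]⟩
      | i'+1, 0 =>
        exact ⟨pvGood_insert a b memo (i'+1) 0 _ hg (by rw [lcsG]), by rw [lcsG]⟩
      | i'+1, j'+1 =>
        have hG : lcsG a b (i'+1) (j'+1) =
            if a.getD i' ' ' = b.getD j' ' ' then
              ((lcsG a b i' j').1 + 1, (lcsG a b i' j').2)
            else if (lcsG a b i' (j'+1)).1 > (lcsG a b (i'+1) j').1 then lcsG a b i' (j'+1)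
            else if (lcsG a b (i'+1) j').1 > (lcsG a b i' (j'+1)).1 then lcsG a b (i'+1) j'
            else ((lcsG a b i' (j'+1)).1,
              (lcsG a b i' (j'+1)).2 + (lcsG a b (i'+1) j').2 -
                (if (lcsG a b i' j').1 = (lcsG a b i' (j'+1)).1 then (lcsG a b i' j').2
                 else 0)) := by rw [lcsG]
        dsimp only
        by_cases hc : a.getD i' ' ' = b.getD j' ' '
        · rw [if_pos hc]
          obtain ⟨hgd, hvd⟩ := ih i' j' (by omega) memo hg
          refine ⟨pvGood_insert a b _ (i'+1) (j'+1) _ hgd ?_, ?_⟩ <;>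
            rw [hvd, hG, if_pos hc]
        · rw [if_neg hc]
          obtain ⟨hgu, hvu⟩ := ih i' (j'+1) (by omega) memo hg
          obtain ⟨hgl, hvl⟩ := ih (i'+1) j' (by omega) _ hgu
          by_cases hgt1 : (pvF a b i' (j'+1) memo).2.1 > (pvF a b (i'+1) j' (pvF a b i' (j'+1) memo).1).2.1
          · rw [if_pos hgt1]
            rw [hvu, hvl] at hgt1
            refine ⟨pvGood_insert a b _ (i'+1) (j'+1) _ hgl ?_, ?_⟩ <;>
              rw [hvu, hG, if_neg hc, if_pos hgt1]
          · rw [if_neg hgt1]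
            rw [hvu, hvl] at hgt1
            by_cases hgt2 : (pvF a b (i'+1) j' (pvF a b i' (j'+1) memo).1).2.1 > (pvF a b i' (j'+1) memo).2.1
            · rw [if_pos hgt2]
              rw [hvu, hvl] at hgt2
              refine ⟨pvGood_insert a b _ (i'+1) (j'+1) _ hgl ?_, ?_⟩ <;>
                rw [hvl, hG, if_neg hc, if_neg hgt1, if_pos hgt2]
            · rw [if_neg hgt2]
              rw [hvu, hvl] at hgt2
              obtain ⟨hgd, hvd⟩ := ih i' j' (by omega) _ hgl
              have hval : ((pvF a b i' (j'+1) memo).2.1,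
                  (pvF a b i' (j'+1) memo).2.2 + (pvF a b (i'+1) j' (pvF a b i' (j'+1) memo).1).2.2 -
                    (if (pvF a b i' j' (pvF a b (i'+1) j' (pvF a b i' (j'+1) memo).1).1).2.1
                        = (pvF a b i' (j'+1) memo).2.1
                     then (pvF a b i' j' (pvF a b (i'+1) j' (pvF a b i' (j'+1) memo).1).1).2.2
                     else 0)) = lcsG a b (i'+1) (j'+1) := by
                rw [hvu, hvl, hvd, hG, if_neg hc, if_neg hgt1, if_neg hgt2]
              exact ⟨pvGood_insert a b _ (i'+1) (j'+1) _ hgd hval, hval⟩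

-- Final assembly ----------------------------------------------------------------

lemma lcs_eq (s1 s2 : String) :
    lcs_count_tabulation s1 s2 = lcs_count_tabulation_alt s1 s2 := by
  unfold lcs_count_tabulation lcs_count_tabulation_alt
  dsimp only
  have hA := pvOuterA s1.toList s2.toList _ (pvInitA s1.toList s2.toList) s1.toList.length le_rfl
  have hfin := hA.2.2 s1.toList.length s2.toList.length le_rfl le_rfl
  have hdone : pvDone s1.toList.length s2.toList.length s1.toList.length s2.toList.length = true := by
    simp [pvDone]
  simp only [if_pos hdone] at hfin
  have hB := (pvF_spec s1.toList s2.toList (s1.toList.length + s2.toList.length)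
    s1.toList.length s2.toList.length le_rfl PySem.Dict.empty
    (pvGood_empty s1.toList s2.toList)).2
  rw [hB, hfin.1, hfin.2]

-- ===== VERDICT (by name: the statement is the Claim_ definition above) =====
theorem lcs_count_tabulation_spec : Claim_equal_lcs_count_tabulation := by
  intro s1 s2 _
  unfold Spec_lcs_count_tabulation
  exact lcs_eq s1 s2
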